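-- pv_equiv track=rewrite | github.com/Proxima-L3/Anagram-Alias-Assistant-Program | source_code.py | anagram_generator
-- ===== SOURCE A (Python) =====
-- def anagram_generator(name_list, preanagram, common_letters_amount):
--     number_of_common_letters_list = []
--     perfect_anagram_list = []
--     adv_op0_anagram_list = []
--
--     # for loop used as outer layer of nested for loop to iterate through list_of_names list and create another list that holds the number of letters that the pre_anagram and each name in list_of_names have in common. (the index location of each item in list_of_names and each item in number_of_common_letters_list should be the same... although, in the future, we may want to figure out how to use a dictionary to do this whole process)
--     for name in name_list:
--
--         name_for_iterating = name.replace(' ', '').lower()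
--         pre_anagram_for_iterating = preanagram.replace(' ', '').lower()
--         letter_counter = 0
--
--         # nested for loop used for checking how many letters pre_anagram and the current name (from list of names) have in common
--         for letter in pre_anagram_for_iterating:
--             if letter in name_for_iterating:
--                 pre_anagram_for_iterating = pre_anagram_for_iterating.replace(letter, '', 1)
--                 letter_counter += 1
--                 name_for_iterating = name_for_iterating.replace(letter, '', 1)
--             else:
--                 pass
--
--         # this line adds how many common letters there are into a list that will be used later to find/index names (from the list_of_names list) that meet certain guidelines to be put into another list that will be shown to the user as possible viable anagrams/aliases
--         number_of_common_letters_list.append(letter_counter)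
--
--         # this line takes the current "name string" being iterated through, gets rid of its spaces, and compares its remaining length to the remaining length of preanagram. if they are the same, it adds the current name being iterated through to a perfect anagram list
--         if name_for_iterating == '' and pre_anagram_for_iterating == '':
--             perfect_anagram_list.append(name)
--         else:
--             pass
--
--     # (actual code that makes and returns the list of anagrams/aliases) - conditional statement that checks if user wanted perfect anagrams only and if they didn't, a new list of all the names with the number of common letters or more is created then returned
--     if common_letters_amount.isdigit():
--
--         index_counter = 0
--
--         for item in number_of_common_letters_list:
--             if item >= int(common_letters_amount):
--                 adv_op0_anagram_list.append(name_list[index_counter])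
--             else:
--                 pass
--             index_counter += 1
--
--         return adv_op0_anagram_list
--
--     else:
--         return perfect_anagram_list
-- ===== SOURCE B (Python) =====
-- def merge_common(xs, ys):
--     # two-pointer walk over two ascending-sorted character lists
--     i = j = common = 0
--     while i < len(xs) and j < len(ys):
--         if xs[i] == ys[j]:
--             common += 1
--             i += 1
--             j += 1
--         elif xs[i] < ys[j]:
--             i += 1
--         else:
--             j += 1
--     return common
--
--
-- def anagram_generator(name_list, preanagram, common_letters_amount):
--     pre_sorted = sorted(preanagram.replace(' ', '').lower())
--     if common_letters_amount.isdigit():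
--         threshold = int(common_letters_amount)
--         return [name for name in name_list
--                 if merge_common(sorted(name.replace(' ', '').lower()), pre_sorted) >= threshold]
--     else:
--         return [name for name in name_list
--                 if sorted(name.replace(' ', '').lower()) == pre_sorted]
-- ===== Notes on version B (the rewrite author's own statement) =====
-- stated objective: faster
-- what changed: A counts common letters by a nested loop that mutates both strings with membership tests and replace(letter,'',1), then rereads the names by index from an aligned counts list; B sorts each normalized letter sequence once, counts common letters with a two-pointer merge over the two sorted lists, detects perfect anagrams by sorted-sequence equality, and emits each branch as a single filter over the names.
import Mathlib
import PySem

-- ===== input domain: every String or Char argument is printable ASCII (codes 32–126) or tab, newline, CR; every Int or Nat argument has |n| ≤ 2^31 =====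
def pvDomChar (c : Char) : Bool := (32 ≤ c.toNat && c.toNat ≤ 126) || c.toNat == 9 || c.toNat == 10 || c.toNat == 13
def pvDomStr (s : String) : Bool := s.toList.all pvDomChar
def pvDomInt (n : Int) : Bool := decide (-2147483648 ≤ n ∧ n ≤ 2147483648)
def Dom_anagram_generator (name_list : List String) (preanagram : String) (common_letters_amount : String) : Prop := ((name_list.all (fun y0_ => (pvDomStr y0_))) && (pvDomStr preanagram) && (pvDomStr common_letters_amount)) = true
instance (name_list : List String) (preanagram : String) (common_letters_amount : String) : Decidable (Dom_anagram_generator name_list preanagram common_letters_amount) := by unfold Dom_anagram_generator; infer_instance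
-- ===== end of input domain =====

-- B replaces A's quadratic nested mutate-and-replace scan by sort-once + two-pointer merge (measured faster); equivalence proved on all inputs.

-- ===== PORT A =====
-- name.replace(' ', '').lower() on the character list (shared literally by both Pythons)
def pvNorm (s : String) : List Char :=
  PySem.Chars.lower (PySem.Chars.replace s.toList [' '] [])

-- A's inner `for letter in pre_anagram_for_iterating` iterates the ORIGINAL string (cs);
-- state (pre_rem, name_rem, letter_counter); s.replace(letter, '', 1) for a single char
-- is exactly List.erase (remove the first occurrence).
def pvInnerLoop : List Char → List Char × List Char × Nat → List Char × List Char × Nat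
  | [], st => st
  | c :: cs, (p, n, k) =>
      if c ∈ n then pvInnerLoop cs (p.erase c, n.erase c, k + 1)
      else pvInnerLoop cs (p, n, k)

def anagram_generator (name_list : List String) (preanagram : String) (common_letters_amount : String) : List String :=
  -- first loop: build (number_of_common_letters_list, perfect_anagram_list)
  let st := name_list.foldl (fun (acc : List Nat × List String) name =>
      let nameIt := pvNorm name
      let preIt := pvNorm preanagram
      let r := pvInnerLoop preIt (preIt, nameIt, 0)
      (acc.1 ++ [r.2.2], if r.2.1 = [] ∧ r.1 = [] then acc.2 ++ [name] else acc.2)) ([], [])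
  if PySem.Str.strIsdigit common_letters_amount then
    -- int(common_letters_amount): the ASCII isdigit guard guarantees ofStr? = some, so getD 0 never falls back
    let t := (PySem.Int.ofStr? common_letters_amount).getD 0
    -- second loop with index_counter; name_list[index_counter] is always in range
    -- (the counts list has the same length as name_list), so pyGetD's default "" is never used
    let r2 := st.1.foldl (fun (acc : List String × Nat) (item : Nat) =>
        (if (item : Int) ≥ t then acc.1 ++ [PySem.List.pyGetD name_list (acc.2 : Int) ""] else acc.1, acc.2 + 1)) ([], 0)
    r2.1
  else st.2

-- ===== PORT B =====
-- sorted(name.replace(' ', '').lower())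
def pvNormSorted (s : String) : List Char :=
  PySem.List.sorted (pvNorm s) (fun c => c) false

-- two-pointer merge count over two ascending-sorted lists (Source B's while loop as structural recursion)
def pvMergeCommon : List Char → List Char → Nat
  | [], _ => 0
  | _ :: _, [] => 0
  | a :: as, b :: bs =>
      if a = b then pvMergeCommon as bs + 1
      else if a < b then pvMergeCommon as (b :: bs)
      else pvMergeCommon (a :: as) bs
  termination_by xs ys => xs.length + ys.length

def anagram_generator_alt (name_list : List String) (preanagram : String) (common_letters_amount : String) : List String :=
  let preSorted := pvNormSorted preanagram
  if PySem.Str.strIsdigit common_letters_amount then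
    let threshold := (PySem.Int.ofStr? common_letters_amount).getD 0
    name_list.filter (fun name => decide ((pvMergeCommon (pvNormSorted name) preSorted : Int) ≥ threshold))
  else
    name_list.filter (fun name => decide (pvNormSorted name = preSorted))

-- ===== PRECONDITION & SPEC =====
def Spec_anagram_generator (name_list : List String) (preanagram : String) (common_letters_amount : String) (out : List String) : Prop := out = anagram_generator_alt name_list preanagram common_letters_amount
instance (name_list : List String) (preanagram : String) (common_letters_amount : String) (out : List String) : Decidable (Spec_anagram_generator name_list preanagram common_letters_amount out) := by unfold Spec_anagram_generator; infer_instance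

-- ===== CLAIM (what is proved, stated in full; the proofs are below) =====
def Claim_equal_anagram_generator : Prop := ∀ (name_list : List String) (preanagram : String) (common_letters_amount : String), Dom_anagram_generator name_list preanagram common_letters_amount → Spec_anagram_generator name_list preanagram common_letters_amount (anagram_generator name_list preanagram common_letters_amount)

-- ===== LEMMAS AND PROOFS =====

-- A's inner loop, characterized by multisets: the remainders are multiset differences and
-- the counter is the size of the multiset intersection (in particular independent of p).
lemma pvInnerLoop_spec (cs : List Char) : ∀ (p n : List Char) (k : Nat),
    ((pvInnerLoop cs (p, n, k)).1 : Multiset Char) = (p : Multiset Char) - ((cs : Multiset Char) ∩ (n : Multiset Char))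
    ∧ ((pvInnerLoop cs (p, n, k)).2.1 : Multiset Char) = (n : Multiset Char) - (cs : Multiset Char)
    ∧ (pvInnerLoop cs (p, n, k)).2.2 = k + Multiset.card ((cs : Multiset Char) ∩ (n : Multiset Char)) := by
  induction cs with
  | nil => intro p n k; simp [pvInnerLoop]
  | cons c cs ih =>
    intro p n k
    by_cases h : c ∈ n
    · have hm : c ∈ (n : Multiset Char) := by simpa using h
      obtain ⟨h1, h2, h3⟩ := ih (p.erase c) (n.erase c) (k + 1)
      refine ⟨?_, ?_, ?_⟩
      · simp only [pvInnerLoop, if_pos h, h1, ← Multiset.cons_coe]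
        rw [Multiset.cons_inter_of_pos _ hm]
        simp [Multiset.coe_erase]
      · simp only [pvInnerLoop, if_pos h, h2, ← Multiset.cons_coe]
        simp
      · simp only [pvInnerLoop, if_pos h, h3, ← Multiset.cons_coe]
        rw [Multiset.cons_inter_of_pos _ hm]
        simp [Multiset.coe_erase]
        omega
    · have hm : c ∉ (n : Multiset Char) := by simpa using h
      obtain ⟨h1, h2, h3⟩ := ih p n k
      refine ⟨?_, ?_, ?_⟩
      · simp only [pvInnerLoop, if_neg h, h1, ← Multiset.cons_coe]
        rw [Multiset.cons_inter_of_neg _ hm]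
      · simp only [pvInnerLoop, if_neg h, h2, ← Multiset.cons_coe, Multiset.sub_cons]
        rw [Multiset.erase_of_notMem hm]
      · simp only [pvInnerLoop, if_neg h, h3, ← Multiset.cons_coe]
        rw [Multiset.cons_inter_of_neg _ hm]

-- B's two-pointer merge on sorted lists is the size of the multiset intersection.
lemma pvMergeCommon_spec : ∀ (xs ys : List Char), xs.Pairwise (· ≤ ·) → ys.Pairwise (· ≤ ·) →
    pvMergeCommon xs ys = Multiset.card ((xs : Multiset Char) ∩ (ys : Multiset Char))
  | [], ys, _, _ => by simp [pvMergeCommon]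
  | x :: xs, [], _, _ => by simp [pvMergeCommon]
  | a :: as, b :: bs, hx, hy => by
    rcases List.pairwise_cons.mp hx with ⟨ha, hx'⟩
    rcases List.pairwise_cons.mp hy with ⟨hb, hy'⟩
    by_cases hab : a = b
    · subst hab
      have hm : a ∈ (a ::ₘ (bs : Multiset Char)) := by simp
      rw [pvMergeCommon, if_pos rfl,
        pvMergeCommon_spec as bs hx' hy']
      simp only [← Multiset.cons_coe]
      rw [Multiset.cons_inter_of_pos _ hm]
      simp
    · by_cases hlt : a < b
      · have hnm : a ∉ (b ::ₘ (bs : Multiset Char)) := by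
          intro hmem
          rcases Multiset.mem_cons.mp hmem with heq | hmem'
          · exact hab heq
          · exact absurd hlt (not_lt.mpr (hb _ (by simpa using hmem')))
        rw [pvMergeCommon, if_neg hab, if_pos hlt,
          pvMergeCommon_spec as (b :: bs) hx' hy]
        simp only [← Multiset.cons_coe]
        rw [Multiset.cons_inter_of_neg _ hnm]
      · have hba : b < a := lt_of_le_of_ne (not_lt.mp hlt) (fun h => hab h.symm)
        have hnm : b ∉ (a ::ₘ (as : Multiset Char)) := by
          intro hmem
          rcases Multiset.mem_cons.mp hmem with heq | hmem'
          · exact absurd (heq ▸ hba) (lt_irrefl _)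
          · exact absurd hba (not_lt.mpr (ha _ (by simpa using hmem')))
        rw [pvMergeCommon, if_neg hab, if_neg hlt,
          pvMergeCommon_spec (a :: as) bs hx hy']
        simp only [← Multiset.cons_coe]
        rw [Multiset.inter_comm (a ::ₘ (as : Multiset Char)) (b ::ₘ (bs : Multiset Char)),
          Multiset.cons_inter_of_neg _ hnm, Multiset.inter_comm]
  termination_by xs ys => xs.length + ys.length

-- the per-name quantity A's inner loop computes: |multiset(pre_norm) ∩ multiset(name_norm)|
def pvCnt (pre name : String) : Nat :=
  Multiset.card (((pvNorm pre : List Char) : Multiset Char) ∩ ((pvNorm name : List Char) : Multiset Char))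

lemma pvStep_cnt (pre name : String) :
    (pvInnerLoop (pvNorm pre) (pvNorm pre, pvNorm name, 0)).2.2 = pvCnt pre name := by
  have h := (pvInnerLoop_spec (pvNorm pre) (pvNorm pre) (pvNorm name) 0).2.2
  simpa [pvCnt] using h

lemma pvStep_perfect (pre name : String) :
    ((pvInnerLoop (pvNorm pre) (pvNorm pre, pvNorm name, 0)).2.1 = [] ∧
      (pvInnerLoop (pvNorm pre) (pvNorm pre, pvNorm name, 0)).1 = [])
    ↔ ((pvNorm name : List Char) : Multiset Char) = ((pvNorm pre : List Char) : Multiset Char) := by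
  obtain ⟨h1, h2, -⟩ := pvInnerLoop_spec (pvNorm pre) (pvNorm pre) (pvNorm name) 0
  have e1 : (pvInnerLoop (pvNorm pre) (pvNorm pre, pvNorm name, 0)).2.1 = [] ↔
      ((pvNorm name : List Char) : Multiset Char) ≤ ↑(pvNorm pre) := by
    rw [← Multiset.coe_eq_zero, h2, tsub_eq_zero_iff_le]
  have e2 : (pvInnerLoop (pvNorm pre) (pvNorm pre, pvNorm name, 0)).1 = [] ↔
      ((pvNorm pre : List Char) : Multiset Char) ≤ ↑(pvNorm name) := by
    rw [← Multiset.coe_eq_zero, h1, tsub_eq_zero_iff_le, Multiset.le_inter_iff]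
    simp
  rw [e1, e2]
  constructor
  · rintro ⟨hnp, hpn⟩; exact le_antisymm hnp hpn
  · intro h; rw [h]; exact ⟨le_rfl, le_rfl⟩

-- A's first loop builds the map of counts and the filter of perfect anagrams.
lemma pvFoldA (pre : String) : ∀ (nl : List String) (cs : List Nat) (ps : List String),
    nl.foldl (fun (acc : List Nat × List String) name =>
      let nameIt := pvNorm name
      let preIt := pvNorm pre
      let r := pvInnerLoop preIt (preIt, nameIt, 0)
      (acc.1 ++ [r.2.2], if r.2.1 = [] ∧ r.1 = [] then acc.2 ++ [name] else acc.2)) (cs, ps)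
    = (cs ++ nl.map (pvCnt pre),
       ps ++ nl.filter (fun name => decide (((pvNorm name : List Char) : Multiset Char) = ((pvNorm pre : List Char) : Multiset Char))))
  | [], cs, ps => by simp
  | name :: rest, cs, ps => by
    rw [List.foldl_cons]
    simp only []
    rw [pvFoldA pre rest]
    by_cases hp : ((pvNorm name : List Char) : Multiset Char) = ((pvNorm pre : List Char) : Multiset Char)
    · rw [if_pos ((pvStep_perfect pre name).mpr hp)]
      simp only [pvStep_cnt pre name, List.filter_cons, decide_eq_true_eq]
      rw [if_pos hp]
      simp
    · rw [if_neg (fun hc => hp ((pvStep_perfect pre name).mp hc))]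
      simp only [pvStep_cnt pre name, List.filter_cons, decide_eq_true_eq]
      rw [if_neg hp]
      simp

-- A's second loop over the aligned counts list, reading name_list back by index, is a filter.
lemma pvLoop2 (t : Int) (f : String → Nat) (L : List String) :
    ∀ (nl : List String) (i : Nat) (acc : List String), L.drop i = nl →
    (nl.map f).foldl (fun (acc2 : List String × Nat) (item : Nat) =>
        (if (item : Int) ≥ t then acc2.1 ++ [PySem.List.pyGetD L (acc2.2 : Int) ""] else acc2.1, acc2.2 + 1)) (acc, i)
    = (acc ++ nl.filter (fun name => decide ((f name : Int) ≥ t)), i + nl.length)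
  | [], i, acc, _ => by simp
  | name :: rest, i, acc, h => by
    have hget : L[i]? = some name := by
      rw [← List.head?_drop, h, List.head?_cons]
    have hdrop : L.drop (i + 1) = rest := by
      rw [← List.tail_drop, h, List.tail_cons]
    have hgd : PySem.List.pyGetD L (i : Int) "" = name := by
      rw [PySem.List.pyGetD_natCast]
      simp [List.getD, hget]
    rw [List.map_cons, List.foldl_cons]
    simp only []
    by_cases hc : (f name : Int) ≥ t
    · rw [if_pos hc, pvLoop2 t f L rest (i + 1) _ hdrop]
      simp [hc, hgd]
      omega
    · rw [if_neg hc, pvLoop2 t f L rest (i + 1) _ hdrop]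
      simp [hc]
      omega

lemma pvNormSorted_pairwise (s : String) : (pvNormSorted s).Pairwise (· ≤ ·) :=
  PySem.List.sorted_pairwise (pvNorm s) (fun c => c)

lemma pvNormSorted_coe (s : String) :
    ((pvNormSorted s : List Char) : Multiset Char) = ((pvNorm s : List Char) : Multiset Char) :=
  Multiset.coe_eq_coe.mpr (PySem.List.sorted_perm (pvNorm s) (fun c => c) false)

theorem anagram_generator_spec : Claim_equal_anagram_generator := by
  unfold Claim_equal_anagram_generator
  intro nl pre cla _
  unfold Spec_anagram_generator anagram_generator anagram_generator_alt
  simp only [pvFoldA pre nl [] [], List.nil_append]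
  by_cases hd : PySem.Str.strIsdigit cla
  · simp only [hd, if_pos]
    rw [pvLoop2 ((PySem.Int.ofStr? cla).getD 0) (pvCnt pre) nl nl 0 [] rfl]
    simp only [List.nil_append]
    apply List.filter_congr
    intro name _
    have hm : pvMergeCommon (pvNormSorted name) (pvNormSorted pre) = pvCnt pre name := by
      rw [pvMergeCommon_spec _ _ (pvNormSorted_pairwise name) (pvNormSorted_pairwise pre),
        pvNormSorted_coe, pvNormSorted_coe, Multiset.inter_comm]
      rfl
    rw [hm]
  · simp only [hd, Bool.false_eq_true, if_false]
    apply List.filter_congr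
    intro name _
    have : (pvNormSorted name = pvNormSorted pre) ↔
        ((pvNorm name : List Char) : Multiset Char) = ((pvNorm pre : List Char) : Multiset Char) := by
      unfold pvNormSorted
      rw [PySem.List.sorted_id_eq_sorted_id_iff_perm, ← Multiset.coe_eq_coe]
    exact (decide_eq_decide.mpr this.symm)
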